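-- pv_equiv track=rewrite | github.com/GeoAIR-lab/TGGLinesPlus | notebooks/utils/process.py | split_path
-- ===== SOURCE A (Python) =====
-- def flatten_list(input_list: list) -> list:
--     """
--     Return a list of lists with a flattened structure.
--
--     NOTE: if you input a list of lists of lists, you will get back a list of lists.
--     However, if you input a list of lists, this will return a list (which can cause problems for other methods).
--
--     Parameters:
--         input_list: a list of lists
--
--     Returns:
--         a list with a flattened structure
--
--
--     """
--     return [val for sublist in input_list for val in sublist]
--
-- def format_list(input_list: list) -> list:
--     """
--     This method will reverse a list if the last element in the list is less
--     than the first element of the list.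
--
--     NOTE: This method is cosmetic, but also helps detect duplicate paths in a NetworkX graph. Additionally, it helps
--     trace paths in a NetworkX graph since it will always orient a path to start with the top, left-most node out of the
--     path segmentation points at input_list[0] and input_list[-1].
--
--     Parameters:
--         input_list: a list of nodes in a NetworkX graph
--
--     Returns: either the orginal input_list, or a reversed list so that the first element is always less than the last element
--
--     """
--     if(input_list[0] > input_list[-1]):
--         return list(reversed(input_list))
--     else:
--         return input_list
--
-- def find_all_indices(search_list: list, search_item) -> list:
--     """
--     Given an input list search_list, iterate through each iteam and return the indices
--     for each match of search_item.
--
--     Parameters: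
--         search_list: the list to search through
--
--         search_item: the item to match on
--
--     Returns:
--         a list of all (if any) indices mathcing the locations of search_item in search_list
--     """
--     return [index for (index, item) in enumerate(search_list) if item == search_item]
--
-- def split_path(current_paths_list: list, pathseg_points_list: list) -> list:
--     """
--     Given a set of initial paths in a graph, we want to extract all "subpaths" from them where
--     paths are split so that they start and end with a path segmentation point.
--
--     Parameters:
--         current_paths_list: the initial graphs found in a NetworkX graph, from calling nx.all_simple_paths(graph, node1, node2)
--                        for all nodes in pathseg_points_list
--
--         pathseg_points_list: a list of points (junctions + terminals) that we want to find paths for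
--
--     Returns:
--         split_paths: a unique set of lists in initial_paths
--     """
--     split_paths = []
--
--     for path in current_paths_list:
--         found_pathseg_points = [node for node in path if node in pathseg_points_list]
--         if(len(found_pathseg_points) == 0):
--             split_paths.append([path])
--         else:
--             found_pathseg_points = list(set(tuple(found_pathseg_points)))
--             pathseg_points_idx = sorted(flatten_list([find_all_indices(path, pathseg_point) for pathseg_point in found_pathseg_points]))
--
--             # https://stackoverflow.com/questions/21752610/iterate-every-2-elements-from-list-at-a-time
--             pathseg_point_combos = [[start, end] for start, end in zip(pathseg_points_idx[:-1], pathseg_points_idx[1:])]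
--             subpaths = [path[start: end+1] for start, end in pathseg_point_combos]
--             split_paths.append(subpaths)
--
--     split_paths = [tuple(format_list(sublist)) for sublist in flatten_list(split_paths)]
--     split_paths = sorted([list(sublist) for sublist in list(set(split_paths))])
--
--     return split_paths
-- ===== SOURCE B (Python) =====
-- def split_path(current_paths_list: list, pathseg_points_list: list) -> list:
--     seg = set(pathseg_points_list)
--     out = set()
--     for path in current_paths_list:
--         idx = [i for i, node in enumerate(path) if node in seg]
--         pieces = [path] if not idx else [path[a:b + 1] for a, b in zip(idx, idx[1:])]
--         for sub in pieces:
--             out.add(tuple(sub) if sub[0] <= sub[-1] else tuple(reversed(sub)))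
--     return sorted(map(list, out))
-- ===== Notes on version B (the rewrite author's own statement) =====
-- stated objective: faster
-- what changed: B makes one linear scan per path collecting segmentation-point indices via a precomputed set (instead of A's per-distinct-point find_all_indices rescans followed by flatten+sort) and deduplicates into a set while iterating instead of A's build-list/flatten/set/sort pipeline.
import Mathlib
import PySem

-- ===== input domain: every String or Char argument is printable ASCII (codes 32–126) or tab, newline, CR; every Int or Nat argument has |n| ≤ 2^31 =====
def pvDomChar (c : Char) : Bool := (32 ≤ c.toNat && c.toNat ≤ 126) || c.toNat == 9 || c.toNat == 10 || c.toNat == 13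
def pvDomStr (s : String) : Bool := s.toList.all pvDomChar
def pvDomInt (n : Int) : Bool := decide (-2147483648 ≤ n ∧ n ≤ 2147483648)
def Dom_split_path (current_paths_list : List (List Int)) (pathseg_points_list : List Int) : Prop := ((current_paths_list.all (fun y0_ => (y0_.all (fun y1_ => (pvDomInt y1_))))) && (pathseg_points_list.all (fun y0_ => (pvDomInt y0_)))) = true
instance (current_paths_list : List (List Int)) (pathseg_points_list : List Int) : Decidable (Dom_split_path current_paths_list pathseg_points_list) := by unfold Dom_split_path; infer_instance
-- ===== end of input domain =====

-- B replaces A's per-segpoint index rescans + post-hoc flatten/dedup/sort with one linear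
-- scan per path collecting segmentation indices and a dedup set built as it goes (objective: faster).


-- ===== PORT A =====
def flatten_list {α : Type} (input_list : List (List α)) : List α :=
  input_list.flatMap (fun sublist => sublist)

def format_list (input_list : List Int) : List Int :=
  match PySem.List.pyGet? input_list 0, PySem.List.pyGet? input_list (-1) with
  | some a, some b => if a > b then input_list.reverse else input_list
  | _, _ => []  -- IndexError on the empty list; excluded by Pre_split_path

def find_all_indices (search_list : List Int) (search_item : Int) : List Int :=
  ((PySem.List.enumerate search_list).filter (fun p => p.2 == search_item)).map (fun p => p.1)

-- the body of A's `for path in current_paths_list` loop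
def split_path_step (pathseg_points_list : List Int) (split_paths : List (List (List Int)))
    (path : List Int) : List (List (List Int)) :=
  let found_pathseg_points := path.filter (fun node => decide (node ∈ pathseg_points_list))
  if found_pathseg_points.length = 0 then split_paths ++ [[path]]
  else
    let found_pathseg_points' := PySem.Set.ofList found_pathseg_points
    let pathseg_points_idx :=
      PySem.List.sorted
        (flatten_list (found_pathseg_points'.map (fun pathseg_point => find_all_indices path pathseg_point)))
        (fun x => x)
    let pathseg_point_combos :=
      (PySem.List.slice pathseg_points_idx none (some (-1))).zip
        (PySem.List.slice pathseg_points_idx (some 1) none)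
    let subpaths := pathseg_point_combos.map (fun se => PySem.List.slice path (some se.1) (some (se.2 + 1)))
    split_paths ++ [subpaths]

def split_path (current_paths_list : List (List Int)) (pathseg_points_list : List Int) : List (List Int) :=
  let split_paths := current_paths_list.foldl (split_path_step pathseg_points_list) []
  let formatted := (flatten_list split_paths).map (fun sublist => format_list sublist)
  PySem.List.sorted (PySem.Set.ofList formatted) (fun x => x)

-- ===== PORT B =====
-- the body of B's `for path in current_paths_list` loop (seg = set(pathseg_points_list))
def split_path_alt_step (seg : PySem.Set Int) (out : PySem.Set (List Int)) (path : List Int) :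
    PySem.Set (List Int) :=
  let idx := ((PySem.List.enumerate path).filter (fun p => PySem.Set.contains seg p.2)).map (fun p => p.1)
  let pieces :=
    if idx = [] then [path]
    else (idx.zip (PySem.List.slice idx (some 1) none)).map
      (fun ab => PySem.List.slice path (some ab.1) (some (ab.2 + 1)))
  pieces.foldl (fun out sub =>
    PySem.Set.add out
      (match PySem.List.pyGet? sub 0, PySem.List.pyGet? sub (-1) with
       | some a, some b => if a ≤ b then sub else sub.reverse
       | _, _ => [])) out

def split_path_alt (current_paths_list : List (List Int)) (pathseg_points_list : List Int) : List (List Int) :=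
  let seg := PySem.Set.ofList pathseg_points_list
  let out := current_paths_list.foldl (split_path_alt_step seg) PySem.Set.empty
  PySem.List.sorted out (fun x => x)

-- ===== PRECONDITION & SPEC =====
-- Pre_ excludes inputs containing an empty path: there Python A raises IndexError in format_list
-- (and Python B raises IndexError as well).
def Pre_split_path (current_paths_list : List (List Int)) (pathseg_points_list : List Int) : Prop :=
  ¬ ([] ∈ current_paths_list)
instance (current_paths_list : List (List Int)) (pathseg_points_list : List Int) : Decidable (Pre_split_path current_paths_list pathseg_points_list) := by unfold Pre_split_path; infer_instance

def pvWitness_split_path : List (List Int) × List Int := ([[1, 2, 3], [3, 2, 1, 4]], [1, 3])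

def Spec_split_path (current_paths_list : List (List Int)) (pathseg_points_list : List Int) (out : List (List Int)) : Prop := out = split_path_alt current_paths_list pathseg_points_list
instance (current_paths_list : List (List Int)) (pathseg_points_list : List Int) (out : List (List Int)) : Decidable (Spec_split_path current_paths_list pathseg_points_list out) := by unfold Spec_split_path; infer_instance

-- ===== CLAIM (what is proved, stated in full; the proofs are below) =====
def Claim_equal_split_path : Prop := ∀ (current_paths_list : List (List Int)) (pathseg_points_list : List Int), Dom_split_path current_paths_list pathseg_points_list → Pre_split_path current_paths_list pathseg_points_list → Spec_split_path current_paths_list pathseg_points_list (split_path current_paths_list pathseg_points_list)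

-- ===== LEMMAS AND PROOFS =====

-- The strictly increasing list of indices of path whose entry lies in pps.
def idxOf (path : List Int) (pps : List Int) : List Int :=
  ((PySem.List.enumerate path).filter (fun p => decide (p.2 ∈ pps))).map (fun p => p.1)

-- The per-path group of pieces both programs produce (proof-side normal form).
def groupOf (path : List Int) (pps : List Int) : List (List Int) :=
  if idxOf path pps = [] then [path]
  else ((idxOf path pps).zip (idxOf path pps).tail).map
    (fun ab => PySem.List.slice path (some ab.1) (some (ab.2 + 1)))

theorem mem_find_all_indices (path : List Int) (p i : Int) :
    i ∈ find_all_indices path p ↔ ∃ (k : Nat), ∃ _ : k < path.length, i = (k : Int) ∧ path[k] = p := by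
  simp only [find_all_indices, List.mem_map, List.mem_filter, PySem.List.mem_enumerate_iff]
  constructor
  · rintro ⟨⟨j, x⟩, ⟨⟨k, hk, hkeq⟩, hx⟩, rfl⟩
    cases hkeq
    exact ⟨k, hk, by simp, by simpa using hx⟩
  · rintro ⟨k, hk, rfl, hp⟩
    exact ⟨((k : Int), path[k]), ⟨⟨k, hk, by simp⟩, by simpa using hp⟩, rfl⟩

theorem mem_idxOf (path pps : List Int) (i : Int) :
    i ∈ idxOf path pps ↔ ∃ (k : Nat), ∃ _ : k < path.length, i = (k : Int) ∧ path[k] ∈ pps := by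
  simp only [idxOf, List.mem_map, List.mem_filter, PySem.List.mem_enumerate_iff]
  constructor
  · rintro ⟨⟨j, x⟩, ⟨⟨k, hk, hkeq⟩, hx⟩, rfl⟩
    cases hkeq
    exact ⟨k, hk, by simp, by simpa using hx⟩
  · rintro ⟨k, hk, rfl, hp⟩
    exact ⟨((k : Int), path[k]), ⟨⟨k, hk, by simp⟩, by simpa using hp⟩, rfl⟩

theorem pairwise_lt_idxOf (path pps : List Int) : (idxOf path pps).Pairwise (· < ·) := by
  unfold idxOf
  refine List.Pairwise.map _ (fun a b h => h) ?_
  exact List.Pairwise.filter _ (PySem.List.pairwise_lt_enumerate path 0)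

theorem nodup_find_all_indices (path : List Int) (p : Int) : (find_all_indices path p).Nodup := by
  unfold find_all_indices
  have h : ((PySem.List.enumerate path 0).filter (fun q => q.2 == p)).Pairwise (fun a b => a.1 < b.1) :=
    List.Pairwise.filter _ (PySem.List.pairwise_lt_enumerate path 0)
  exact (List.Pairwise.map _ (fun a b (h : a.1 < b.1) => (ne_of_lt h : a.1 ≠ b.1)) h)

theorem sorted_flatten_eq_idxOf (path pps : List Int) :
    PySem.List.sorted
      (flatten_list ((PySem.Set.ofList (path.filter (fun node => decide (node ∈ pps)))).map
        (fun q => find_all_indices path q))) (fun x => x) = idxOf path pps := by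
  set found := path.filter (fun node => decide (node ∈ pps)) with hfound
  have hflat : flatten_list ((PySem.Set.ofList found).map (fun q => find_all_indices path q))
      = (PySem.Set.ofList found).flatMap (fun q => find_all_indices path q) := by
    simp [flatten_list, List.flatMap_map]
  rw [hflat]
  refine PySem.List.sorted_eq_of_perm_of_pairwise_lt _ _ _ ?_ (pairwise_lt_idxOf path pps)
  have hnodupIdx : (idxOf path pps).Nodup :=
    (pairwise_lt_idxOf path pps).imp (fun h => ne_of_lt h)
  have hnodupFlat : ((PySem.Set.ofList found).flatMap (fun q => find_all_indices path q)).Nodup := by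
    rw [List.nodup_flatMap]
    refine ⟨fun q _ => nodup_find_all_indices path q, ?_⟩
    refine (PySem.Set.nodup_ofList found).imp ?_
    intro p q hpq i hip hiq
    obtain ⟨k, hk, rfl, hkp⟩ := (mem_find_all_indices path p i).mp hip
    obtain ⟨k', hk', hkk', hkq⟩ := (mem_find_all_indices path q _).mp hiq
    have : k = k' := by exact_mod_cast hkk'
    subst this
    exact hpq (hkp.symm.trans hkq)
  rw [List.perm_ext_iff_of_nodup hnodupIdx hnodupFlat]
  intro i
  rw [mem_idxOf, List.mem_flatMap]
  constructor
  · rintro ⟨k, hk, rfl, hmem⟩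
    refine ⟨path[k], ?_, (mem_find_all_indices path _ _).mpr ⟨k, hk, rfl, rfl⟩⟩
    rw [PySem.Set.mem_ofList, hfound, List.mem_filter]
    exact ⟨List.getElem_mem hk, by simpa using hmem⟩
  · rintro ⟨q, hq, hi⟩
    obtain ⟨k, hk, rfl, hkq⟩ := (mem_find_all_indices path q i).mp hi
    rw [PySem.Set.mem_ofList, hfound, List.mem_filter] at hq
    exact ⟨k, hk, rfl, by rw [hkq]; simpa using hq.2⟩

theorem filter_len_zero_iff (path pps : List Int) :
    (path.filter (fun node => decide (node ∈ pps))).length = 0 ↔ idxOf path pps = [] := by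
  rw [List.length_eq_zero_iff, List.filter_eq_nil_iff, List.eq_nil_iff_forall_not_mem]
  constructor
  · intro h i hi
    obtain ⟨k, hk, rfl, hmem⟩ := (mem_idxOf path pps i).mp hi
    exact h _ (List.getElem_mem hk) (by simpa using hmem)
  · intro h x hx hmem
    obtain ⟨k, hk, rfl⟩ := List.mem_iff_getElem.mp hx
    exact h (k : Int) ((mem_idxOf path pps _).mpr ⟨k, hk, rfl, by simpa using hmem⟩)

theorem zip_dropLast_tail {α : Type} (xs : List α) : xs.dropLast.zip xs.tail = xs.zip xs.tail := by
  match xs with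
  | [] => rfl
  | [a] => rfl
  | a :: b :: t =>
    simp only [List.dropLast_cons₂, List.tail_cons, List.zip_cons_cons]
    have := zip_dropLast_tail (b :: t)
    simp only [List.tail_cons] at this
    rw [this]

theorem bfmt_eq_format_list (sub : List Int) :
    (match PySem.List.pyGet? sub 0, PySem.List.pyGet? sub (-1) with
     | some a, some b => if a ≤ b then sub else sub.reverse
     | _, _ => []) = format_list sub := by
  unfold format_list
  cases h0 : PySem.List.pyGet? sub 0 <;> cases h1 : PySem.List.pyGet? sub (-1) <;>
    first
      | rfl
      | (rename_i a b
         show (if a ≤ b then sub else sub.reverse) = (if a > b then sub.reverse else sub)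
         by_cases h : a ≤ b
         · rw [if_pos h, if_neg (by omega)]
         · rw [if_neg h, if_pos (by omega)])

theorem foldl_flatMap {α β σ : Type} (h : α → List β) (step : σ → β → σ) (l : List α) (s : σ) :
    l.foldl (fun s x => (h x).foldl step s) s = (l.flatMap h).foldl step s := by
  induction l generalizing s with
  | nil => rfl
  | cons a t ih => simp [List.flatMap_cons, List.foldl_append, ih]

theorem split_path_step_eq (pps : List Int) (acc : List (List (List Int))) (path : List Int) :
    split_path_step pps acc path = acc ++ [groupOf path pps] := by
  unfold split_path_step groupOf
  simp only [sorted_flatten_eq_idxOf, PySem.List.slice_to_neg_one, PySem.List.slice_from_one,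
    zip_dropLast_tail, filter_len_zero_iff]
  split_ifs <;> rfl

theorem split_path_eq_normal (cps : List (List Int)) (pps : List Int) :
    split_path cps pps =
      PySem.List.sorted (PySem.Set.ofList ((cps.flatMap (fun p => groupOf p pps)).map format_list))
        (fun x => x) := by
  unfold split_path
  dsimp only
  have hstep : split_path_step pps = fun acc path => acc ++ [(fun p => groupOf p pps) path] := by
    funext acc path
    exact split_path_step_eq pps acc path
  rw [hstep, PySem.List.foldl_append_singleton_eq_map]
  simp [flatten_list, List.flatMap_map]

theorem split_path_alt_step_eq (pps : List Int) (out : PySem.Set (List Int)) (path : List Int) :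
    split_path_alt_step (PySem.Set.ofList pps) out path =
      ((groupOf path pps).map format_list).foldl PySem.Set.add out := by
  unfold split_path_alt_step groupOf
  dsimp only
  have hfilter : ((PySem.List.enumerate path).filter
        (fun p => PySem.Set.contains (PySem.Set.ofList pps) p.2)) =
      ((PySem.List.enumerate path).filter (fun p => decide (p.2 ∈ pps))) := by
    apply List.filter_congr
    intro p _
    rw [Bool.eq_iff_iff, decide_eq_true_eq, PySem.Set.contains_iff, PySem.Set.mem_ofList]
  rw [hfilter]
  have hidx : ((PySem.List.enumerate path).filter (fun p => decide (p.2 ∈ pps))).map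
      (fun p => p.1) = idxOf path pps := rfl
  rw [hidx, PySem.List.slice_from_one, List.foldl_map]
  congr 1
  funext s sub
  rw [bfmt_eq_format_list]

theorem split_path_alt_eq_normal (cps : List (List Int)) (pps : List Int) :
    split_path_alt cps pps =
      PySem.List.sorted (PySem.Set.ofList ((cps.flatMap (fun p => groupOf p pps)).map format_list))
        (fun x => x) := by
  unfold split_path_alt
  dsimp only
  have hstep : split_path_alt_step (PySem.Set.ofList pps) =
      fun out path => ((fun p => (groupOf p pps).map format_list) path).foldl PySem.Set.add out := by
    funext out path
    exact split_path_alt_step_eq pps out path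
  rw [hstep, foldl_flatMap, PySem.Set.ofList_eq_foldl, List.map_flatMap]
  rfl

-- ===== VERDICT (by name: the statement is the Claim_ definition above) =====
theorem split_path_spec : Claim_equal_split_path := by
  intro cps pps _ _
  unfold Spec_split_path
  rw [split_path_eq_normal, split_path_alt_eq_normal]
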